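-- pv_equiv track=rewrite | github.com/krzemGit/flaskCompare | common.py | session_results
-- ===== SOURCE A (Python) =====
-- def session_results(results):
--     # limits the number of search results to 10 per platform
--     ses_res = []
--     platforms = ['amazon', 'ebay', 'allegro']
--
--     for platform in platforms:
--         i = 0
--         for result in results:
--             if i < 10 and result['platform'] == platform:
--                 ses_res.append(result)
--                 i += 1
--
--     return ses_res
-- ===== SOURCE B (Python) =====
-- def session_results(results):
--     # limits the number of search results to 10 per platform
--     # one pass: bucket each result by platform (cap 10), stop early once all full
--     amazon, ebay, allegro = [], [], []
--     buckets = {'amazon': amazon, 'ebay': ebay, 'allegro': allegro}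
--     for result in results:
--         if len(amazon) == 10 and len(ebay) == 10 and len(allegro) == 10:
--             break
--         b = buckets.get(result['platform'])
--         if b is not None and len(b) < 10:
--             b.append(result)
--     return amazon + ebay + allegro
-- ===== Notes on version B (the rewrite author's own statement) =====
-- stated objective: alternative
-- what changed: Replaces three sequential full scans (one per platform) by a single pass that buckets each result into per-platform lists capped at 10 and breaks once all three are full, then concatenates the buckets.
import Mathlib
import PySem

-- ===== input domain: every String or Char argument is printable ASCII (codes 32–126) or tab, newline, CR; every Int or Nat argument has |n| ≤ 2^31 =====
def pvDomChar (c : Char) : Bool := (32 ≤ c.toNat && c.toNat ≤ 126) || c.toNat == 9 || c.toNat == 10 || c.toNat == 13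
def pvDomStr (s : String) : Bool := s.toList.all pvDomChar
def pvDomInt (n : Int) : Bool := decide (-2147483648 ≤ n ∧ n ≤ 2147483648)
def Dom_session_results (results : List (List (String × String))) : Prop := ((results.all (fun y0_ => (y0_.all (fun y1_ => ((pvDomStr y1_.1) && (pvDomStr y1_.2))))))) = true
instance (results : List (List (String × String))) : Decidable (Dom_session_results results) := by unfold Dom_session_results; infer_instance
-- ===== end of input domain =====

-- B buckets results per platform in ONE pass (caps of 10, early break) instead of A's three
-- sequential scans; return values agree on Pre_ (inputs where Python A raises no KeyError).

-- ===== PORT A =====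
-- result['platform'] is ported as Dict.getD … "" : exact on Pre_ (where the lookup A actually
-- performs never hits a missing key; "" equals no platform name, so a skip stays a skip).
def session_results (results : List (List (String × String))) : List (List (String × String)) :=
  let platforms := ["amazon", "ebay", "allegro"]
  platforms.foldl (fun ses_res platform =>
    (results.foldl
      (fun (st : List (List (String × String)) × Int) result =>
        if st.2 < 10 && (PySem.Dict.getD (PySem.Dict.mk result) "platform" "" == platform) then
          (st.1 ++ [result], st.2 + 1)
        else st)
      (ses_res, (0 : Int))).1) []

-- ===== PORT B =====
-- Python's `break` is ported as an identity step: once all three buckets hold 10 the step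
-- changes nothing, so folding on yields the same value the break yields.
def session_results_alt (results : List (List (String × String))) : List (List (String × String)) :=
  let bs := results.foldl
    (fun (st : List (List (String × String)) × List (List (String × String)) × List (List (String × String))) result =>
      if st.1.length == 10 && st.2.1.length == 10 && st.2.2.length == 10 then st
      else
        let p := PySem.Dict.getD (PySem.Dict.mk result) "platform" ""
        if p == "amazon" then (if st.1.length < 10 then (st.1 ++ [result], st.2.1, st.2.2) else st)
        else if p == "ebay" then (if st.2.1.length < 10 then (st.1, st.2.1 ++ [result], st.2.2) else st)
        else if p == "allegro" then (if st.2.2.length < 10 then (st.1, st.2.1, st.2.2 ++ [result]) else st)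
        else st)
    ([], [], [])
  bs.1 ++ bs.2.1 ++ bs.2.2

-- ===== PRECONDITION & SPEC =====
-- Pre_ excludes exactly the inputs where Python A raises KeyError: a result without a
-- 'platform' key that A still inspects, i.e. one reached while some platform has fewer
-- than 10 matches among the earlier results.  (Python B raises there too.)
def Pre_session_results (results : List (List (String × String))) : Prop :=
  ∀ j, (h : j < results.length) →
    (PySem.Dict.get? (PySem.Dict.mk results[j]) "platform").isNone →
      ∀ p ∈ (["amazon", "ebay", "allegro"] : List String),
        10 ≤ (results.take j).countP (fun r => PySem.Dict.get? (PySem.Dict.mk r) "platform" == some p)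
instance (results : List (List (String × String))) : Decidable (Pre_session_results results) := by
  unfold Pre_session_results; infer_instance

def pvWitness_session_results : (List (List (String × String))) :=
  [[("platform", "amazon"), ("title", "a1")], [("platform", "ebay")], [("platform", "other")]]

def Spec_session_results (results : List (List (String × String))) (out : List (List (String × String))) : Prop := out = session_results_alt results
instance (results : List (List (String × String))) (out : List (List (String × String))) : Decidable (Spec_session_results results out) := by unfold Spec_session_results; infer_instance

-- ===== CLAIM (what is proved, stated in full; the proofs are below) =====
def Claim_equal_session_results : Prop := ∀ (results : List (List (String × String))), Dom_session_results results → Pre_session_results results → Spec_session_results results (session_results results)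

-- ===== LEMMAS AND PROOFS =====

-- the first 10-capped sublist of results whose 'platform' is p, counting from i
def pvCap (p : String) : List (List (String × String)) → Int → List (List (String × String))
  | [], _ => []
  | r :: rs, i =>
    if i < 10 && (PySem.Dict.getD (PySem.Dict.mk r) "platform" "" == p) then r :: pvCap p rs (i + 1)
    else pvCap p rs i

theorem pvCap_ge (p : String) (rs : List (List (String × String))) (i : Int) (h : 10 ≤ i) :
    pvCap p rs i = [] := by
  induction rs with
  | nil => rfl
  | cons r rs ih => simp [pvCap, show ¬ (i < 10) by omega, ih]

theorem foldA (p : String) (rs : List (List (String × String)))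
    (acc : List (List (String × String))) (i : Int) :
    rs.foldl (fun st result =>
        if st.2 < 10 && (PySem.Dict.getD (PySem.Dict.mk result) "platform" "" == p) then
          (st.1 ++ [result], st.2 + 1)
        else st) (acc, i)
    = (acc ++ pvCap p rs i, i + (pvCap p rs i).length) := by
  induction rs generalizing acc i with
  | nil => simp [pvCap]
  | cons r rs ih =>
    rw [List.foldl_cons]
    by_cases hc : (decide (i < 10) && (PySem.Dict.getD (PySem.Dict.mk r) "platform" "" == p)) = true
    · rw [if_pos hc, ih]
      have hcap : pvCap p (r :: rs) i = r :: pvCap p rs (i + 1) := by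
        simp only [pvCap, if_pos hc]
      rw [hcap]
      refine Prod.ext ?_ ?_
      · simp
      · simp; ring
    · rw [if_neg hc, ih]
      have hcap : pvCap p (r :: rs) i = pvCap p rs i := by
        simp only [pvCap, if_neg hc]
      rw [hcap]

theorem foldB (rs : List (List (String × String)))
    (a e g : List (List (String × String))) :
    rs.foldl
      (fun (st : List (List (String × String)) × List (List (String × String)) × List (List (String × String))) result =>
        if st.1.length == 10 && st.2.1.length == 10 && st.2.2.length == 10 then st
        else
          let p := PySem.Dict.getD (PySem.Dict.mk result) "platform" ""
          if p == "amazon" then (if st.1.length < 10 then (st.1 ++ [result], st.2.1, st.2.2) else st)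
          else if p == "ebay" then (if st.2.1.length < 10 then (st.1, st.2.1 ++ [result], st.2.2) else st)
          else if p == "allegro" then (if st.2.2.length < 10 then (st.1, st.2.1, st.2.2 ++ [result]) else st)
          else st)
      (a, e, g)
    = (a ++ pvCap "amazon" rs (a.length : Int),
       e ++ pvCap "ebay" rs (e.length : Int),
       g ++ pvCap "allegro" rs (g.length : Int)) := by
  induction rs generalizing a e g with
  | nil => simp [pvCap]
  | cons r rs ih =>
    rw [List.foldl_cons]
    by_cases hfull : (a.length == 10 && e.length == 10 && g.length == 10) = true
    · simp only [if_pos hfull]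
      rw [ih]
      simp only [Bool.and_eq_true, beq_iff_eq] at hfull
      obtain ⟨⟨ha, he⟩, hg⟩ := hfull
      rw [pvCap_ge _ _ _ (by omega : (10:Int) ≤ (a.length:Int)),
          pvCap_ge _ _ _ (by omega : (10:Int) ≤ (e.length:Int)),
          pvCap_ge _ _ _ (by omega : (10:Int) ≤ (g.length:Int)),
          pvCap_ge _ _ _ (by omega : (10:Int) ≤ (a.length:Int)),
          pvCap_ge _ _ _ (by omega : (10:Int) ≤ (e.length:Int)),
          pvCap_ge _ _ _ (by omega : (10:Int) ≤ (g.length:Int))]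
    · simp only [if_neg hfull]
      set p := PySem.Dict.getD (PySem.Dict.mk r) "platform" "" with hp
      by_cases hA : (p == "amazon") = true
      · replace hA := eq_of_beq hA
        by_cases hlen : a.length < 10
        · rw [if_pos (by simpa [hp] using hA), if_pos (by simpa using hlen), ih]
          have h1 : pvCap "amazon" (r :: rs) (a.length : Int)
              = r :: pvCap "amazon" rs ((a.length : Int) + 1) := by
            simp [pvCap, ← hp, hA, show ((a.length:Int) < 10) by exact_mod_cast hlen]
          have h2 : pvCap "ebay" (r :: rs) (e.length : Int) = pvCap "ebay" rs (e.length : Int) := by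
            simp [pvCap, ← hp, hA]
          have h3 : pvCap "allegro" (r :: rs) (g.length : Int) = pvCap "allegro" rs (g.length : Int) := by
            simp [pvCap, ← hp, hA]
          rw [h1, h2, h3]
          simp
          try push_cast
          try ring_nf
        · rw [if_pos (by simpa [hp] using hA), if_neg (by simpa using hlen), ih]
          have h1 : pvCap "amazon" (r :: rs) (a.length : Int) = pvCap "amazon" rs (a.length : Int) := by
            simp [pvCap, show ¬ ((a.length:Int) < 10) by exact_mod_cast hlen]
          have h2 : pvCap "ebay" (r :: rs) (e.length : Int) = pvCap "ebay" rs (e.length : Int) := by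
            simp [pvCap, ← hp, hA]
          have h3 : pvCap "allegro" (r :: rs) (g.length : Int) = pvCap "allegro" rs (g.length : Int) := by
            simp [pvCap, ← hp, hA]
          rw [h1, h2, h3]
      · by_cases hE : (p == "ebay") = true
        · replace hE := eq_of_beq hE
          by_cases hlen : e.length < 10
          · rw [if_neg hA, if_pos (by simpa [hp] using hE), if_pos (by simpa using hlen), ih]
            have h1 : pvCap "amazon" (r :: rs) (a.length : Int) = pvCap "amazon" rs (a.length : Int) := by
              simp [pvCap, ← hp, hE]
            have h2 : pvCap "ebay" (r :: rs) (e.length : Int)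
                = r :: pvCap "ebay" rs ((e.length : Int) + 1) := by
              simp [pvCap, ← hp, hE, show ((e.length:Int) < 10) by exact_mod_cast hlen]
            have h3 : pvCap "allegro" (r :: rs) (g.length : Int) = pvCap "allegro" rs (g.length : Int) := by
              simp [pvCap, ← hp, hE]
            rw [h1, h2, h3]
            simp
            try push_cast
            try ring_nf
          · rw [if_neg hA, if_pos (by simpa [hp] using hE), if_neg (by simpa using hlen), ih]
            have h1 : pvCap "amazon" (r :: rs) (a.length : Int) = pvCap "amazon" rs (a.length : Int) := by
              simp [pvCap, ← hp, hE]
            have h2 : pvCap "ebay" (r :: rs) (e.length : Int) = pvCap "ebay" rs (e.length : Int) := by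
              simp [pvCap, show ¬ ((e.length:Int) < 10) by exact_mod_cast hlen]
            have h3 : pvCap "allegro" (r :: rs) (g.length : Int) = pvCap "allegro" rs (g.length : Int) := by
              simp [pvCap, ← hp, hE]
            rw [h1, h2, h3]
        · by_cases hG : (p == "allegro") = true
          · replace hG := eq_of_beq hG
            by_cases hlen : g.length < 10
            · rw [if_neg hA, if_neg hE, if_pos (by simpa [hp] using hG), if_pos (by simpa using hlen), ih]
              have h1 : pvCap "amazon" (r :: rs) (a.length : Int) = pvCap "amazon" rs (a.length : Int) := by
                simp [pvCap, ← hp, hG]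
              have h2 : pvCap "ebay" (r :: rs) (e.length : Int) = pvCap "ebay" rs (e.length : Int) := by
                simp [pvCap, ← hp, hG]
              have h3 : pvCap "allegro" (r :: rs) (g.length : Int)
                  = r :: pvCap "allegro" rs ((g.length : Int) + 1) := by
                simp [pvCap, ← hp, hG, show ((g.length:Int) < 10) by exact_mod_cast hlen]
              rw [h1, h2, h3]
              simp
              try push_cast
              try ring_nf
            · rw [if_neg hA, if_neg hE, if_pos (by simpa [hp] using hG), if_neg (by simpa using hlen), ih]
              have h1 : pvCap "amazon" (r :: rs) (a.length : Int) = pvCap "amazon" rs (a.length : Int) := by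
                simp [pvCap, ← hp, hG]
              have h2 : pvCap "ebay" (r :: rs) (e.length : Int) = pvCap "ebay" rs (e.length : Int) := by
                simp [pvCap, ← hp, hG]
              have h3 : pvCap "allegro" (r :: rs) (g.length : Int) = pvCap "allegro" rs (g.length : Int) := by
                simp [pvCap, show ¬ ((g.length:Int) < 10) by exact_mod_cast hlen]
              rw [h1, h2, h3]
          · rw [if_neg hA, if_neg hE, if_neg hG, ih]
            have h1 : pvCap "amazon" (r :: rs) (a.length : Int) = pvCap "amazon" rs (a.length : Int) := by
              simp [pvCap, ← hp, hA]
            have h2 : pvCap "ebay" (r :: rs) (e.length : Int) = pvCap "ebay" rs (e.length : Int) := by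
              simp [pvCap, ← hp, hE]
            have h3 : pvCap "allegro" (r :: rs) (g.length : Int) = pvCap "allegro" rs (g.length : Int) := by
              simp [pvCap, ← hp, hG]
            rw [h1, h2, h3]

theorem session_results_eq_caps (results : List (List (String × String))) :
    session_results results
      = pvCap "amazon" results 0 ++ pvCap "ebay" results 0 ++ pvCap "allegro" results 0 := by
  unfold session_results
  simp only [List.foldl_cons, List.foldl_nil, foldA]
  simp

theorem session_results_alt_eq_caps (results : List (List (String × String))) :
    session_results_alt results
      = pvCap "amazon" results 0 ++ pvCap "ebay" results 0 ++ pvCap "allegro" results 0 := by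
  unfold session_results_alt
  rw [foldB]
  simp

-- ===== VERDICT (by name: the statement is the Claim_ definition above) =====
theorem session_results_spec : Claim_equal_session_results := by
  intro results _ _
  unfold Spec_session_results
  rw [session_results_eq_caps, session_results_alt_eq_caps]
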